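-- pv_equiv track=rewrite | github.com/AutApple/DungeonGenerator | main.py | count
-- ===== SOURCE A (Python) =====
-- chunkWidth = 640//32
--
-- chunkHeight = 480//32
--
-- def count(chunk, x, y):
--     c = 0
--     for i in range(-1, 2):
--         for  j in range(-1, 2):
--             nx = x+j
--             ny = y+i
--
--             if(nx < 0 or ny < 0 or nx >= chunkWidth or ny >= chunkHeight):
--                 c+=1
--             elif(chunk[ny][nx]):
--                 c+=1
--     return c
-- ===== SOURCE B (Python) =====
-- chunkWidth = 640//32
--
-- chunkHeight = 480//32
--
-- def count(chunk, x, y):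
--     # arithmetic out-of-bounds count + scan of the clamped in-bounds sub-rectangle
--     x0 = max(0, x - 1)
--     x1 = min(chunkWidth - 1, x + 1)
--     y0 = max(0, y - 1)
--     y1 = min(chunkHeight - 1, y + 1)
--     if x1 < x0 or y1 < y0:
--         return 9
--     c = 9 - (x1 - x0 + 1) * (y1 - y0 + 1)
--     for ny in range(y0, y1 + 1):
--         row = chunk[ny]
--         for nx in range(x0, x1 + 1):
--             if row[nx]:
--                 c += 1
--     return c
-- ===== Notes on version B (the rewrite author's own statement) =====
-- stated objective: alternative
-- what changed: Replaces the 9-cell loop with per-cell bounds tests by an arithmetic count of out-of-bounds neighbours (9 minus the clamped rectangle's area) plus a scan of only the clamped in-bounds sub-rectangle.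
import Mathlib
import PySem

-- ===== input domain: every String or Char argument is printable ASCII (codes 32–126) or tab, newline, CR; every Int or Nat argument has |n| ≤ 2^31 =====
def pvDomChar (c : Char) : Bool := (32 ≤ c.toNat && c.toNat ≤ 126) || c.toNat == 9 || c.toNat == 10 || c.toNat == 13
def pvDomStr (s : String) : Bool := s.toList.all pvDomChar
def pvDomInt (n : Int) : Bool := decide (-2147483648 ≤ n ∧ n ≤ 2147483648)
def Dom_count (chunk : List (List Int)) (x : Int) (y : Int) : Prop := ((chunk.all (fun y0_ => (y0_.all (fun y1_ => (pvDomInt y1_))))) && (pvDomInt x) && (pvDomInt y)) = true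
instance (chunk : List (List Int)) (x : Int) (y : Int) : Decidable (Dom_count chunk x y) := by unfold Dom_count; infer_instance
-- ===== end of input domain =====

-- B replaces the 9-cell boundary-tested loop by an arithmetic out-of-bounds count plus a
-- scan of only the clamped in-bounds sub-rectangle (objective: alternative decomposition).

def chunkWidth : Int := PySem.Int.floordiv 640 32

def chunkHeight : Int := PySem.Int.floordiv 480 32

-- ===== PORT A =====
-- chunk[ny][nx] is ported with pyGetD; Pre_count restricts to inputs where every such
-- access is in range (exactly where the Python returns instead of raising IndexError).
def count (chunk : List (List Int)) (x : Int) (y : Int) : Int :=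
  (PySem.List.pyRange (-1) 2 1).foldl (fun c i =>
    (PySem.List.pyRange (-1) 2 1).foldl (fun c j =>
      let nx := x + j
      let ny := y + i
      if nx < 0 ∨ ny < 0 ∨ nx ≥ chunkWidth ∨ ny ≥ chunkHeight then c + 1
      else if PySem.List.pyGetD (PySem.List.pyGetD chunk ny []) nx 0 ≠ 0 then c + 1
      else c) c) 0

-- ===== PORT B =====
def count_alt (chunk : List (List Int)) (x : Int) (y : Int) : Int :=
  let x0 := max 0 (x - 1)
  let x1 := min (chunkWidth - 1) (x + 1)
  let y0 := max 0 (y - 1)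
  let y1 := min (chunkHeight - 1) (y + 1)
  if x1 < x0 ∨ y1 < y0 then 9
  else
    (PySem.List.pyRange y0 (y1 + 1) 1).foldl (fun c ny =>
      let row := PySem.List.pyGetD chunk ny []
      (PySem.List.pyRange x0 (x1 + 1) 1).foldl (fun c nx =>
        if PySem.List.pyGetD row nx 0 ≠ 0 then c + 1 else c) c)
      (9 - (x1 - x0 + 1) * (y1 - y0 + 1))

-- ===== PRECONDITION & SPEC =====
-- Pre_count: every neighbourhood cell lying inside the 20×15 chunk bounds must actually
-- exist in the list (otherwise Python's chunk[ny][nx] raises IndexError in both programs).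
def Pre_count (chunk : List (List Int)) (x : Int) (y : Int) : Prop :=
  ∀ i ∈ PySem.List.pyRange (-1) 2 1, ∀ j ∈ PySem.List.pyRange (-1) 2 1,
    (0 ≤ x + j ∧ 0 ≤ y + i ∧ x + j < 20 ∧ y + i < 15) →
      (y + i).toNat < chunk.length ∧ (x + j).toNat < (chunk.getD (y + i).toNat []).length
instance (chunk : List (List Int)) (x : Int) (y : Int) : Decidable (Pre_count chunk x y) := by
  unfold Pre_count; infer_instance

def pvWitness_count : List (List Int) × Int × Int :=
  ([[0, 1, 0], [1, 1, 0], [0, 0, 1]], 1, 1)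

def Spec_count (chunk : List (List Int)) (x : Int) (y : Int) (out : Int) : Prop := out = count_alt chunk x y
instance (chunk : List (List Int)) (x : Int) (y : Int) (out : Int) : Decidable (Spec_count chunk x y out) := by unfold Spec_count; infer_instance

-- ===== CLAIM (what is proved, stated in full; the proofs are below) =====
def Claim_equal_count : Prop := ∀ (chunk : List (List Int)) (x : Int) (y : Int), Dom_count chunk x y → Pre_count chunk x y → Spec_count chunk x y (count chunk x y)

-- ===== LEMMAS AND PROOFS =====

-- A's inner loop (one row ny), with its literal 20/15 bounds.
def pvInnerA (chunk : List (List Int)) (x ny c : Int) : Int :=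
  (PySem.List.pyRange (-1) 2 1).foldl (fun c j =>
    if x + j < 0 ∨ ny < 0 ∨ x + j ≥ 20 ∨ ny ≥ 15 then c + 1
    else if PySem.List.pyGetD (PySem.List.pyGetD chunk ny []) (x + j) 0 ≠ 0 then c + 1
    else c) c

-- B's inner loop over the clamped column range.
def pvInnerB (chunk : List (List Int)) (x0 x1 ny c : Int) : Int :=
  (PySem.List.pyRange x0 (x1 + 1) 1).foldl (fun c nx =>
    if PySem.List.pyGetD (PySem.List.pyGetD chunk ny []) nx 0 ≠ 0 then c + 1 else c) c

def pvS (chunk : List (List Int)) (x0 x1 ny : Int) : Int := pvInnerB chunk x0 x1 ny 0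

def pvCols (x : Int) : Int := max 0 (min 19 (x + 1) - max 0 (x - 1) + 1)

lemma pvRange1 (a d : Int) (hd : d = a + 1) : PySem.List.pyRange a d 1 = [a] := by
  subst hd
  rw [PySem.List.pyRange_one_cons (by omega), PySem.List.pyRange_one_eq_nil (by omega)]

lemma pvRange2 (a b d : Int) (hb : b = a + 1) (hd : d = b + 1) :
    PySem.List.pyRange a d 1 = [a, b] := by
  subst hb; subst hd
  rw [PySem.List.pyRange_one_cons (by omega), PySem.List.pyRange_one_cons (by omega),
    PySem.List.pyRange_one_eq_nil (by omega)]

lemma pvRange3 (a b c d : Int) (hb : b = a + 1) (hc : c = b + 1) (hd : d = c + 1) :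
    PySem.List.pyRange a d 1 = [a, b, c] := by
  subst hb; subst hc; subst hd
  rw [PySem.List.pyRange_one_cons (by omega), PySem.List.pyRange_one_cons (by omega),
    PySem.List.pyRange_one_cons (by omega), PySem.List.pyRange_one_eq_nil (by omega)]

lemma pvRangeA : PySem.List.pyRange (-1) 2 1 = [(-1 : Int), 0, 1] :=
  pvRange3 _ _ _ _ (by norm_num) (by norm_num) (by norm_num)

lemma pvFoldShift (p : Int → Prop) [DecidablePred p] (l : List Int) :
    ∀ (c : Int), l.foldl (fun c nx => if p nx then c + 1 else c) c
      = c + l.foldl (fun c nx => if p nx then c + 1 else c) 0 := by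
  induction l with
  | nil => intro c; simp
  | cons h t ih =>
    intro c
    simp only [List.foldl_cons]
    rw [ih, ih (if p h then 0 + 1 else 0)]
    split_ifs <;> omega

lemma pvInnerB_eq_shift (chunk : List (List Int)) (x0 x1 ny c : Int) :
    pvInnerB chunk x0 x1 ny c = c + pvS chunk x0 x1 ny := by
  unfold pvS pvInnerB
  exact pvFoldShift (fun nx => PySem.List.pyGetD (PySem.List.pyGetD chunk ny []) nx 0 ≠ 0) _ c

lemma A_eq (chunk : List (List Int)) (x y : Int) :
    count chunk x y
      = pvInnerA chunk x (y + 1) (pvInnerA chunk x (y + 0) (pvInnerA chunk x (y + -1) 0)) := by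
  unfold count pvInnerA
  rw [pvRangeA,
    show chunkWidth = (20 : Int) from by decide, show chunkHeight = (15 : Int) from by decide]
  simp only [List.foldl_cons, List.foldl_nil]

lemma B_eq (chunk : List (List Int)) (x y : Int) :
    count_alt chunk x y
      = if min 19 (x + 1) < max 0 (x - 1) ∨ min 14 (y + 1) < max 0 (y - 1) then 9
        else (PySem.List.pyRange (max 0 (y - 1)) (min 14 (y + 1) + 1) 1).foldl
          (fun c ny => pvInnerB chunk (max 0 (x - 1)) (min 19 (x + 1)) ny c)
          (9 - (min 19 (x + 1) - max 0 (x - 1) + 1) * (min 14 (y + 1) - max 0 (y - 1) + 1)) := by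
  unfold count_alt pvInnerB
  rw [show chunkWidth = (20 : Int) from by decide, show chunkHeight = (15 : Int) from by decide]
  norm_num

-- out-of-bounds row (or fully out-of-bounds column window): each of the 3 cells counts 1
lemma LinnerOut (chunk : List (List Int)) (x ny c : Int)
    (h : ny < 0 ∨ 15 ≤ ny ∨ x ≤ -2 ∨ 21 ≤ x) :
    pvInnerA chunk x ny c = c + 3 := by
  unfold pvInnerA
  rw [pvRangeA]
  simp only [List.foldl_cons, List.foldl_nil]
  split_ifs <;> omega

-- in-bounds row: A's triple equals B's clamped column scan plus the out-of-bounds columns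
set_option maxHeartbeats 1000000 in
lemma Linner (chunk : List (List Int)) (x ny c : Int) (h0 : 0 ≤ ny) (h1 : ny < 15) :
    pvInnerA chunk x ny c
      = pvInnerB chunk (max 0 (x - 1)) (min 19 (x + 1)) ny (c + (3 - pvCols x)) := by
  unfold pvInnerA pvInnerB pvCols
  rw [pvRangeA]
  rcases (by omega : x ≤ -2 ∨ x = -1 ∨ x = 0 ∨ (1 ≤ x ∧ x ≤ 18) ∨ x = 19 ∨ x = 20 ∨ 21 ≤ x)
    with hx|hx|hx|hx|hx|hx|hx
  · rw [show max 0 (min 19 (x + 1) - max 0 (x - 1) + 1) = (0 : Int) from by omega,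
      PySem.List.pyRange_one_eq_nil (show min 19 (x + 1) + 1 ≤ max 0 (x - 1) from by omega)]
    simp only [List.foldl_cons, List.foldl_nil]
    split_ifs <;> omega
  · rw [show max 0 (min 19 (x + 1) - max 0 (x - 1) + 1) = (1 : Int) from by omega,
      show max 0 (x - 1) = x + 1 from by omega,
      show min 19 (x + 1) + 1 = x + 2 from by omega, pvRange1 (x + 1) (x + 2) (by omega)]
    simp only [List.foldl_cons, List.foldl_nil]
    split_ifs <;> omega
  · rw [show max 0 (min 19 (x + 1) - max 0 (x - 1) + 1) = (2 : Int) from by omega,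
      show max 0 (x - 1) = x + 0 from by omega,
      show min 19 (x + 1) + 1 = x + 2 from by omega,
      pvRange2 (x + 0) (x + 1) (x + 2) (by omega) (by omega)]
    simp only [List.foldl_cons, List.foldl_nil]
    split_ifs <;> omega
  · rw [show max 0 (min 19 (x + 1) - max 0 (x - 1) + 1) = (3 : Int) from by omega,
      show max 0 (x - 1) = x + -1 from by omega,
      show min 19 (x + 1) + 1 = x + 2 from by omega,
      pvRange3 (x + -1) (x + 0) (x + 1) (x + 2) (by omega) (by omega) (by omega)]
    simp only [List.foldl_cons, List.foldl_nil]
    split_ifs <;> omega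
  · rw [show max 0 (min 19 (x + 1) - max 0 (x - 1) + 1) = (2 : Int) from by omega,
      show max 0 (x - 1) = x + -1 from by omega,
      show min 19 (x + 1) + 1 = x + 1 from by omega,
      pvRange2 (x + -1) (x + 0) (x + 1) (by omega) (by omega)]
    simp only [List.foldl_cons, List.foldl_nil]
    split_ifs <;> omega
  · rw [show max 0 (min 19 (x + 1) - max 0 (x - 1) + 1) = (1 : Int) from by omega,
      show max 0 (x - 1) = x + -1 from by omega,
      show min 19 (x + 1) + 1 = x + 0 from by omega,
      pvRange1 (x + -1) (x + 0) (by omega)]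
    simp only [List.foldl_cons, List.foldl_nil]
    split_ifs <;> omega
  · rw [show max 0 (min 19 (x + 1) - max 0 (x - 1) + 1) = (0 : Int) from by omega,
      PySem.List.pyRange_one_eq_nil (show min 19 (x + 1) + 1 ≤ max 0 (x - 1) from by omega)]
    simp only [List.foldl_cons, List.foldl_nil]
    split_ifs <;> omega

-- ===== VERDICT (by name: the statement is the Claim_ definition above) =====
set_option maxHeartbeats 1000000 in
theorem count_spec : Claim_equal_count := by
  intro chunk x y _ _
  unfold Spec_count
  rw [A_eq, B_eq]
  rcases (by omega : y ≤ -2 ∨ y = -1 ∨ y = 0 ∨ (1 ≤ y ∧ y ≤ 13) ∨ y = 14 ∨ y = 15 ∨ 16 ≤ y)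
    with hy|hy|hy|hy|hy|hy|hy
  · rw [if_pos (by omega : min 19 (x + 1) < max 0 (x - 1) ∨ min 14 (y + 1) < max 0 (y - 1)),
      LinnerOut chunk x (y + -1) _ (by omega), LinnerOut chunk x (y + 0) _ (by omega),
      LinnerOut chunk x (y + 1) _ (by omega)]
    omega
  · by_cases hX : min 19 (x + 1) < max 0 (x - 1)
    · rw [if_pos (Or.inl hX), LinnerOut chunk x (y + -1) _ (by omega),
        LinnerOut chunk x (y + 0) _ (by omega), LinnerOut chunk x (y + 1) _ (by omega)]
      omega
    · rw [if_neg (by omega), LinnerOut chunk x (y + -1) _ (by omega),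
        LinnerOut chunk x (y + 0) _ (by omega), Linner chunk x (y + 1) _ (by omega) (by omega),
        show min 14 (y + 1) - max 0 (y - 1) + 1 = (1 : Int) from by omega,
        show max 0 (y - 1) = y + 1 from by omega,
        show min 14 (y + 1) + 1 = y + 2 from by omega, pvRange1 (y + 1) (y + 2) (by omega)]
      simp only [List.foldl_cons, List.foldl_nil]
      simp only [pvInnerB_eq_shift, pvCols]
      omega
  · by_cases hX : min 19 (x + 1) < max 0 (x - 1)
    · rw [if_pos (Or.inl hX), LinnerOut chunk x (y + -1) _ (by omega),
        LinnerOut chunk x (y + 0) _ (by omega), LinnerOut chunk x (y + 1) _ (by omega)]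
      omega
    · rw [if_neg (by omega), LinnerOut chunk x (y + -1) _ (by omega),
        Linner chunk x (y + 0) _ (by omega) (by omega),
        Linner chunk x (y + 1) _ (by omega) (by omega),
        show min 14 (y + 1) - max 0 (y - 1) + 1 = (2 : Int) from by omega,
        show max 0 (y - 1) = y + 0 from by omega,
        show min 14 (y + 1) + 1 = y + 2 from by omega,
        pvRange2 (y + 0) (y + 1) (y + 2) (by omega) (by omega)]
      simp only [List.foldl_cons, List.foldl_nil]
      simp only [pvInnerB_eq_shift, pvCols]
      omega
  · by_cases hX : min 19 (x + 1) < max 0 (x - 1)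
    · rw [if_pos (Or.inl hX), LinnerOut chunk x (y + -1) _ (by omega),
        LinnerOut chunk x (y + 0) _ (by omega), LinnerOut chunk x (y + 1) _ (by omega)]
      omega
    · rw [if_neg (by omega), Linner chunk x (y + -1) _ (by omega) (by omega),
        Linner chunk x (y + 0) _ (by omega) (by omega),
        Linner chunk x (y + 1) _ (by omega) (by omega),
        show min 14 (y + 1) - max 0 (y - 1) + 1 = (3 : Int) from by omega,
        show max 0 (y - 1) = y + -1 from by omega,
        show min 14 (y + 1) + 1 = y + 2 from by omega,
        pvRange3 (y + -1) (y + 0) (y + 1) (y + 2) (by omega) (by omega) (by omega)]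
      simp only [List.foldl_cons, List.foldl_nil]
      simp only [pvInnerB_eq_shift, pvCols]
      omega
  · by_cases hX : min 19 (x + 1) < max 0 (x - 1)
    · rw [if_pos (Or.inl hX), LinnerOut chunk x (y + -1) _ (by omega),
        LinnerOut chunk x (y + 0) _ (by omega), LinnerOut chunk x (y + 1) _ (by omega)]
      omega
    · rw [if_neg (by omega), Linner chunk x (y + -1) _ (by omega) (by omega),
        Linner chunk x (y + 0) _ (by omega) (by omega),
        LinnerOut chunk x (y + 1) _ (by omega),
        show min 14 (y + 1) - max 0 (y - 1) + 1 = (2 : Int) from by omega,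
        show max 0 (y - 1) = y + -1 from by omega,
        show min 14 (y + 1) + 1 = y + 1 from by omega,
        pvRange2 (y + -1) (y + 0) (y + 1) (by omega) (by omega)]
      simp only [List.foldl_cons, List.foldl_nil]
      simp only [pvInnerB_eq_shift, pvCols]
      omega
  · by_cases hX : min 19 (x + 1) < max 0 (x - 1)
    · rw [if_pos (Or.inl hX), LinnerOut chunk x (y + -1) _ (by omega),
        LinnerOut chunk x (y + 0) _ (by omega), LinnerOut chunk x (y + 1) _ (by omega)]
      omega
    · rw [if_neg (by omega), Linner chunk x (y + -1) _ (by omega) (by omega),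
        LinnerOut chunk x (y + 0) _ (by omega), LinnerOut chunk x (y + 1) _ (by omega),
        show min 14 (y + 1) - max 0 (y - 1) + 1 = (1 : Int) from by omega,
        show max 0 (y - 1) = y + -1 from by omega,
        show min 14 (y + 1) + 1 = y + 0 from by omega,
        pvRange1 (y + -1) (y + 0) (by omega)]
      simp only [List.foldl_cons, List.foldl_nil]
      simp only [pvInnerB_eq_shift, pvCols]
      omega
  · rw [if_pos (by omega : min 19 (x + 1) < max 0 (x - 1) ∨ min 14 (y + 1) < max 0 (y - 1)),
      LinnerOut chunk x (y + -1) _ (by omega), LinnerOut chunk x (y + 0) _ (by omega),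
      LinnerOut chunk x (y + 1) _ (by omega)]
    omega
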